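-- pv_equiv track=rewrite | github.com/pietrondo/tutor-ai | backend/comprehensive_concept_generator.py | get_relevant_books
-- ===== SOURCE A (Python) =====
-- from typing import List, Dict, Any
--
-- def get_relevant_books(chapters: List[Dict], keywords: List[str]) -> List[str]:
--     """Find books/chapters relevant to given keywords."""
--     relevant = []
--     for chapter in chapters:
--         title = chapter.get("title", "").lower()
--         book_title = chapter.get("book_title", "")
--         if any(keyword.lower() in title for keyword in keywords) and book_title not in relevant:
--             relevant.append(book_title)
--             if len(relevant) >= 3:  # Limit to 3 books
--                 break
--     return relevant if relevant else ["Materiale del corso"]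
-- ===== SOURCE B (Python) =====
-- def get_relevant_books(chapters, keywords):
--     """Find books/chapters relevant to given keywords."""
--     books = [
--         chapter.get("book_title", "")
--         for chapter in chapters
--         if any(keyword.lower() in chapter.get("title", "").lower() for keyword in keywords)
--     ]
--     return list(dict.fromkeys(books))[:3] or ["Materiale del corso"]
-- ===== Notes on version B (the rewrite author's own statement) =====
-- stated objective: simpler
-- what changed: Replaces the stateful loop (accumulate + membership dedup + early break at 3) with a declarative filter->map comprehension, an ordered dedup via dict.fromkeys, a [:3] slice and an 'or' fallback.
import Mathlib
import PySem

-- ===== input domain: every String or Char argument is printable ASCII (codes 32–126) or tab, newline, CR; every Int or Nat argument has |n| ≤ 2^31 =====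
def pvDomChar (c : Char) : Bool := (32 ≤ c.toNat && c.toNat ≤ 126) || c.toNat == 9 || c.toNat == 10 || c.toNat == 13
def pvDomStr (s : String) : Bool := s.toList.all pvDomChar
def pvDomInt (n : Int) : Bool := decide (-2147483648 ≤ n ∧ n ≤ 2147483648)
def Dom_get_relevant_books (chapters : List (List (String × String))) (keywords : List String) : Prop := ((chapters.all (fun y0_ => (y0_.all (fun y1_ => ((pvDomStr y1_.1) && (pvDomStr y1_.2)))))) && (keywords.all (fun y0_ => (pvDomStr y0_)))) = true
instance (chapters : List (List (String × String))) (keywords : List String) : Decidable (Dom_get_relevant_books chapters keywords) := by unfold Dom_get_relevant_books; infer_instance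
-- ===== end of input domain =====

-- B replaces A's stateful loop (append + membership dedup + early break at 3) by a
-- filter→map comprehension, an ordered dedup (dict.fromkeys), a [:3] slice and an 'or' fallback (simpler decomposition).

-- ===== PORT A =====
-- chapter.get(k, "") on the association list (first match, per the type convention)
def pvChGet (c : List (String × String)) (k : String) : String :=
  (List.lookup k c).getD ""

-- does any keyword (lowercased) occur in the chapter title (lowercased)?
def pvMatches (keywords : List String) (c : List (String × String)) : Bool :=
  keywords.any (fun kw => PySem.Str.isIn (PySem.Str.lower kw) (PySem.Str.lower (pvChGet c "title")))

-- A's loop: accumulate book titles; skip members; early break at length 3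
def pvLoopA (keywords : List String) : List (List (String × String)) → List String → List String
  | [], relevant => relevant
  | c :: cs, relevant =>
    let book_title := pvChGet c "book_title"
    if pvMatches keywords c && !(relevant.contains book_title) then
      let relevant' := relevant ++ [book_title]
      if 3 ≤ relevant'.length then relevant' else pvLoopA keywords cs relevant'
    else
      pvLoopA keywords cs relevant

def get_relevant_books (chapters : List (List (String × String))) (keywords : List String) : List String :=
  let relevant := pvLoopA keywords chapters []
  if relevant.isEmpty then ["Materiale del corso"] else relevant

-- ===== PORT B =====
def get_relevant_books_alt (chapters : List (List (String × String))) (keywords : List String) : List String :=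
  let books := (chapters.filter (fun c => pvMatches keywords c)).map (fun c => pvChGet c "book_title")
  let res := (PySem.List.dedup books).take 3
  if res.isEmpty then ["Materiale del corso"] else res

-- ===== PRECONDITION & SPEC =====
def Spec_get_relevant_books (chapters : List (List (String × String))) (keywords : List String) (out : List String) : Prop := out = get_relevant_books_alt chapters keywords
instance (chapters : List (List (String × String))) (keywords : List String) (out : List String) : Decidable (Spec_get_relevant_books chapters keywords out) := by unfold Spec_get_relevant_books; infer_instance

-- ===== CLAIM (what is proved, stated in full; the proofs are below) =====
def Claim_equal_get_relevant_books : Prop := ∀ (chapters : List (List (String × String))) (keywords : List String), Dom_get_relevant_books chapters keywords → Spec_get_relevant_books chapters keywords (get_relevant_books chapters keywords)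

-- ===== LEMMAS AND PROOFS =====

-- ofList over an extension: ofList (rel ++ l) = fold add over l starting from rel (rel nodup)
theorem pv_ofList_append_of_nodup (rel l : List String) (h : rel.Nodup) :
    PySem.Set.ofList (rel ++ l) = PySem.Set.update rel l := by
  rw [PySem.Set.ofList_append, PySem.Set.ofList_eq_self_of_nodup rel h]

-- main invariant: A's loop from a short nodup accumulator = take 3 of the dedup of acc ++ remaining books
theorem pvLoopA_eq (keywords : List String) (cs : List (List (String × String)))
    (rel : List String) (hnd : rel.Nodup) (hlt : rel.length < 3) :
    pvLoopA keywords cs rel =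
      (PySem.List.dedup (rel ++ (cs.filter (fun c => pvMatches keywords c)).map (fun c => pvChGet c "book_title"))).take 3 := by
  induction cs generalizing rel with
  | nil =>
      simp only [pvLoopA, List.filter_nil, List.map_nil, List.append_nil,
        PySem.List.dedup_eq_ofList, PySem.Set.ofList_eq_self_of_nodup rel hnd]
      exact (List.take_of_length_le (Nat.le_of_lt hlt)).symm
  | cons c cs ih =>
      by_cases hm : pvMatches keywords c = true
      · have hfil : List.filter (fun c => pvMatches keywords c) (c :: cs)
            = c :: List.filter (fun c => pvMatches keywords c) cs :=
          List.filter_cons_of_pos hm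
        by_cases hmem : pvChGet c "book_title" ∈ rel
        · -- b already accumulated: dropped on both sides
          have hstep : pvLoopA keywords (c :: cs) rel = pvLoopA keywords cs rel := by
            simp [pvLoopA, hm, hmem]
          rw [hstep, ih rel hnd hlt, hfil]
          simp only [List.map_cons, PySem.List.dedup_eq_ofList,
            pv_ofList_append_of_nodup _ _ hnd, PySem.Set.update_cons,
            PySem.Set.add_of_mem hmem]
        · have hnd' : (rel ++ [pvChGet c "book_title"]).Nodup :=
            List.Nodup.append hnd (List.nodup_singleton _)
              (by simpa [List.disjoint_singleton] using hmem)
          have hstep : pvLoopA keywords (c :: cs) rel =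
              (if 3 ≤ (rel ++ [pvChGet c "book_title"]).length then rel ++ [pvChGet c "book_title"]
               else pvLoopA keywords cs (rel ++ [pvChGet c "book_title"])) := by
            simp [pvLoopA, hm, hmem]
          have hrhs : rel ++ (List.filter (fun c => pvMatches keywords c) (c :: cs)).map (fun c => pvChGet c "book_title")
              = (rel ++ [pvChGet c "book_title"]) ++ (List.filter (fun c => pvMatches keywords c) cs).map (fun c => pvChGet c "book_title") := by
            simp [hfil]
          rw [hstep, hrhs]
          by_cases h3 : 3 ≤ (rel ++ [pvChGet c "book_title"]).length
          · -- accumulator reaches 3: loop breaks; the dedup starts with rel ++ [pvChGet c "book_title"] and take 3 keeps exactly it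
            rw [if_pos h3]
            have hlen : (rel ++ [pvChGet c "book_title"]).length = 3 := by
              simp only [List.length_append, List.length_cons, List.length_nil] at h3 ⊢
              omega
            rw [PySem.List.dedup_eq_ofList, pv_ofList_append_of_nodup _ _ hnd',
              PySem.Set.update_eq_append_filter,
              List.take_append_of_le_length (by omega),
              List.take_of_length_le (by omega)]
          · rw [if_neg h3]
            have hlt' : (rel ++ [pvChGet c "book_title"]).length < 3 := by omega
            exact ih (rel ++ [pvChGet c "book_title"]) hnd' hlt'
      · -- no keyword matches: chapter skipped on both sides
        have hm' : pvMatches keywords c = false := by simpa using hm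
        have hstep : pvLoopA keywords (c :: cs) rel = pvLoopA keywords cs rel := by
          simp [pvLoopA, hm']
        have hfil : List.filter (fun c => pvMatches keywords c) (c :: cs)
            = List.filter (fun c => pvMatches keywords c) cs :=
          List.filter_cons_of_neg (by simp [hm'])
        rw [hstep, ih rel hnd hlt, hfil]

-- ===== VERDICT (by name: the statement is the Claim_ definition above) =====
theorem get_relevant_books_spec : Claim_equal_get_relevant_books := by
  intro chapters keywords _
  show get_relevant_books chapters keywords = get_relevant_books_alt chapters keywords
  unfold get_relevant_books get_relevant_books_alt
  rw [pvLoopA_eq keywords chapters [] List.nodup_nil (by simp)]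
  simp
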